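-- pv_equiv track=rewrite | github.com/a-hr/UMIclusterer | src/consensus.py | _assign_q_score
-- ===== SOURCE A (Python) =====
-- def _assign_q_score(q_score: dict) -> dict:
--     r = {}
--     for key, value in q_score.items():
--         if value >= 30:
--             r[key] = 8
--         elif value >= 20:
--             r[key] = 6
--         elif value >= 15:
--             r[key] = 4
--         else:
--             r[key] = 2
--     return r
-- ===== SOURCE B (Python) =====
-- def _assign_q_score(q_score: dict) -> dict:
--     return {k: 2 + 2 * sum(v >= c for c in (15, 20, 30)) for k, v in q_score.items()}
-- ===== Notes on version B (the rewrite author's own statement) =====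
-- stated objective: idiomatic
-- what changed: Replaced the if/elif threshold chain and explicit accumulator dict with a dict comprehension computing the score arithmetically as 2 + 2*(number of thresholds passed).
import Mathlib
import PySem

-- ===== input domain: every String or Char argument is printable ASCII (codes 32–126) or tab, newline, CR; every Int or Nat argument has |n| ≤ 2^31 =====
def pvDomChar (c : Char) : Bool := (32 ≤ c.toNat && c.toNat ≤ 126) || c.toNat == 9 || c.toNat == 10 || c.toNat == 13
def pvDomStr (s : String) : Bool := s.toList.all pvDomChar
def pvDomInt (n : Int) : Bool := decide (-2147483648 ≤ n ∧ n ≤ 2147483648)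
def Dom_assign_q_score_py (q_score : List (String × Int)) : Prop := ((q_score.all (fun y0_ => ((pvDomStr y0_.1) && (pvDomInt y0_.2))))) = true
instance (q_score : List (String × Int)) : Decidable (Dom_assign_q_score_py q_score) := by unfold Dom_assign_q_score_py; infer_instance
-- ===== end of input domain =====

-- B replaces A's if/elif threshold chain with a dict comprehension scoring arithmetically (idiomatic; return value only).


-- ===== PORT A =====
def assign_q_score_py (q_score : List (String × Int)) : List (String × Int) :=
  (q_score.foldl (fun (r : PySem.Dict String Int) kv =>
      if kv.2 ≥ 30 then r.insert kv.1 8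
      else if kv.2 ≥ 20 then r.insert kv.1 6
      else if kv.2 ≥ 15 then r.insert kv.1 4
      else r.insert kv.1 2) PySem.Dict.empty).items

-- ===== PORT B =====
def assign_q_score_py_alt (q_score : List (String × Int)) : List (String × Int) :=
  (q_score.foldl (fun (r : PySem.Dict String Int) kv =>
      r.insert kv.1 (2 + 2 * (([15, 20, 30] : List Int).foldl
        (fun acc c => acc + (if kv.2 ≥ c then 1 else 0)) 0))) PySem.Dict.empty).items

-- ===== PRECONDITION & SPEC =====
def Spec_assign_q_score_py (q_score : List (String × Int)) (out : List (String × Int)) : Prop := out = assign_q_score_py_alt q_score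
instance (q_score : List (String × Int)) (out : List (String × Int)) : Decidable (Spec_assign_q_score_py q_score out) := by unfold Spec_assign_q_score_py; infer_instance

-- ===== CLAIM (what is proved, stated in full; the proofs are below) =====
def Claim_equal_assign_q_score_py : Prop := ∀ (q_score : List (String × Int)), Dom_assign_q_score_py q_score → Spec_assign_q_score_py q_score (assign_q_score_py q_score)

-- ===== LEMMAS AND PROOFS =====
lemma assign_step_eq (r : PySem.Dict String Int) (kv : String × Int) :
    (if kv.2 ≥ 30 then r.insert kv.1 8
     else if kv.2 ≥ 20 then r.insert kv.1 6
     else if kv.2 ≥ 15 then r.insert kv.1 4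
     else r.insert kv.1 2)
    = r.insert kv.1 (2 + 2 * (([15, 20, 30] : List Int).foldl
        (fun acc c => acc + (if kv.2 ≥ c then 1 else 0)) 0)) := by
  simp only [List.foldl]
  split_ifs with h30 h20 h15 <;> simp_all <;> omega

-- ===== VERDICT (by name: the statement is the Claim_ definition above) =====
theorem assign_q_score_py_spec : Claim_equal_assign_q_score_py := by
  intro q _
  unfold Spec_assign_q_score_py assign_q_score_py assign_q_score_py_alt
  congr 2
  funext r kv
  exact assign_step_eq r kv
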